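-- pv_equiv track=rewrite | github.com/davinaizer/bootstrap-doc-pack | scripts/bootstrap_project_guide.py | split_frontmatter
-- ===== SOURCE A (Python) =====
-- def parse_frontmatter(text: str) -> dict[str, str]:
--     lines = text.splitlines()
--     if not lines or lines[0].strip() != "---":
--         return {}
--     fm: dict[str, str] = {}
--     for line in lines[1:]:
--         if line.strip() == "---":
--             break
--         if ":" not in line:
--             continue
--         key, value = line.split(":", 1)
--         fm[key.strip()] = value.strip().strip('"')
--     return fm
--
-- def split_frontmatter(text: str) -> tuple[dict[str, str], str]:
--     lines = text.splitlines()
--     if not lines or lines[0].strip() != "---":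
--         return {}, text
--     end_index = None
--     for index, line in enumerate(lines[1:], start=1):
--         if line.strip() == "---":
--             end_index = index
--             break
--     if end_index is None:
--         return {}, text
--     fm_text = "\n".join(lines[1:end_index])
--     body = "\n".join(lines[end_index + 1 :]).lstrip("\n")
--     return parse_frontmatter("---\n" + fm_text + "\n---\n"), body
-- ===== SOURCE B (Python) =====
-- def split_frontmatter(text: str) -> tuple[dict[str, str], str]:
--     lines = text.splitlines()
--     if not lines or lines[0].strip() != "---":
--         return {}, text
--     fm: dict[str, str] = {}
--     for i in range(1, len(lines)):
--         line = lines[i]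
--         if line.strip() == "---":
--             return fm, "\n".join(lines[i + 1 :]).lstrip("\n")
--         if ":" in line:
--             key, value = line.split(":", 1)
--             fm[key.strip()] = value.strip().strip('"')
--     return {}, text
-- ===== Notes on version B (the rewrite author's own statement) =====
-- stated objective: simpler
-- what changed: B makes one pass over the split lines that builds the frontmatter dict and finds the closing fence together, instead of A's first locating the fence, reconstructing a fenced frontmatter string and re-splitting/re-scanning it with the parse_frontmatter helper.
import Mathlib
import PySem

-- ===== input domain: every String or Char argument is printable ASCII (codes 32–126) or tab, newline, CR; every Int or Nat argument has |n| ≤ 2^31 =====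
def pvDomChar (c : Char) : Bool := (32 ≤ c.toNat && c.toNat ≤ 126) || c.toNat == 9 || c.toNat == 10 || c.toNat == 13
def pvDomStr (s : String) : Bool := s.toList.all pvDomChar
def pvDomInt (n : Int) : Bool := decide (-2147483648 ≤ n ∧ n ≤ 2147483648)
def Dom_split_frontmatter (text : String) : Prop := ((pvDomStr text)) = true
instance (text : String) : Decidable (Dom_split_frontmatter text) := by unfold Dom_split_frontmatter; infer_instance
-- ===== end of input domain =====

-- B replaces A's reconstruct-and-reparse (build "---\n…\n---\n" and scan it again with
-- parse_frontmatter) by one single pass over the lines that builds the dict and finds the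
-- closing fence together; objective: simpler.

-- ===== PORT A =====
-- loop of parse_frontmatter: break at '---', skip lines without ':', else insert
def pvPfLoop (lns : List String) (fm : PySem.Dict String String) : PySem.Dict String String :=
  match lns with
  | [] => fm
  | line :: rest =>
    if PySem.Str.strip line == "---" then fm
    else if !(PySem.Str.isIn ":" line) then pvPfLoop rest fm
    else
      match PySem.Str.splitMax? line ":" 1 with
      | some (key :: value :: _) =>
          pvPfLoop rest (fm.insert (PySem.Str.strip key) (PySem.Str.stripChars (PySem.Str.strip value) "\""))
      | _ => pvPfLoop rest fm   -- unreachable: split(sep, 1) with sep in line yields two parts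

def parse_frontmatter (text : String) : PySem.Dict String String :=
  let lines := PySem.Str.splitlines text
  if lines.isEmpty || !(PySem.Str.strip (lines.headD "") == "---") then ∅
  else pvPfLoop lines.tail ∅

-- the enumerate loop searching for the closing fence
def pvFindEnd (lns : List String) (i : Nat) : Option Nat :=
  match lns with
  | [] => none
  | line :: rest => if PySem.Str.strip line == "---" then some i else pvFindEnd rest (i + 1)

def split_frontmatter (text : String) : (List (String × String)) × String :=
  let lines := PySem.Str.splitlines text
  if lines.isEmpty || !(PySem.Str.strip (lines.headD "") == "---") then ([], text)
  else
    match pvFindEnd lines.tail 1 with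
    | none => ([], text)
    | some endIndex =>
      let fmText := PySem.Str.join "\n" (PySem.List.slice lines (some 1) (some (endIndex : Int)))
      -- .lstrip("\n") ported by hand as dropWhile (· == '\n'): exact for the single-char argument
      let body := String.ofList (List.dropWhile (fun c => c == '\n')
        (PySem.Str.join "\n" (PySem.List.slice lines (some ((endIndex : Int) + 1)) none)).toList)
      ((parse_frontmatter ("---\n" ++ fmText ++ "\n---\n")).items, body)

-- ===== PORT B =====
-- one pass: on the closing fence return (fm, remaining lines); otherwise accumulate key/value
def pvAltLoop (lns : List String) (fm : PySem.Dict String String) :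
    Option (PySem.Dict String String × List String) :=
  match lns with
  | [] => none
  | line :: rest =>
    if PySem.Str.strip line == "---" then some (fm, rest)
    else if PySem.Str.isIn ":" line then
      match PySem.Str.splitMax? line ":" 1 with
      | some (key :: value :: _) =>
          pvAltLoop rest (fm.insert (PySem.Str.strip key) (PySem.Str.stripChars (PySem.Str.strip value) "\""))
      | _ => pvAltLoop rest fm   -- unreachable
    else pvAltLoop rest fm

def split_frontmatter_alt (text : String) : (List (String × String)) × String :=
  match PySem.Str.splitlines text with
  | [] => ([], text)
  | first :: rest =>
    if !(PySem.Str.strip first == "---") then ([], text)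
    else
      match pvAltLoop rest ∅ with
      | none => ([], text)
      | some (fm, tl) =>
        (fm.items, String.ofList (List.dropWhile (fun c => c == '\n') (PySem.Str.join "\n" tl).toList))

-- ===== PRECONDITION & SPEC =====
def Spec_split_frontmatter (text : String) (out : (List (String × String)) × String) : Prop := out = split_frontmatter_alt text
instance (text : String) (out : (List (String × String)) × String) : Decidable (Spec_split_frontmatter text out) := by unfold Spec_split_frontmatter; infer_instance

-- ===== CLAIM (what is proved, stated in full; the proofs are below) =====
def Claim_equal_split_frontmatter : Prop := ∀ (text : String), Dom_split_frontmatter text → Spec_split_frontmatter text (split_frontmatter text)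

-- ===== LEMMAS AND PROOFS =====


-- break-character predicate of Python splitlines (matches PySem.Chars.splitlines's internal one)
def pvIsB (c : Char) : Bool :=
  decide (c.toNat = 10) || decide (c.toNat = 13) || decide (c.toNat = 11) || decide (c.toNat = 12) ||
  decide (c.toNat = 28) || decide (c.toNat = 29) || decide (c.toNat = 30) || decide (c.toNat = 133) ||
  decide (c.toNat = 8232) || decide (c.toNat = 8233)

theorem pvSplitlines_eq (s : List Char) :
    PySem.Chars.splitlines s = PySem.Chars.splitlines.go pvIsB s [] [] := rfl

theorem pvDashes_nobreak : ∀ c ∈ "---".toList, pvIsB c = false := by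
  intro c hc; fin_cases hc <;> rfl

theorem pvGo_nil (isB : Char → Bool) (cur : List Char) (acc : List (List Char)) :
    PySem.Chars.splitlines.go isB [] cur acc =
      if cur.isEmpty then acc.reverse else (cur.reverse :: acc).reverse := by
  rw [PySem.Chars.splitlines.go.eq_def]

theorem pvGo_break (c : Char) (rest cur : List Char) (acc : List (List Char))
    (h : pvIsB c = true) (hc : c ≠ '\r') :
    PySem.Chars.splitlines.go pvIsB (c :: rest) cur acc =
      PySem.Chars.splitlines.go pvIsB rest [] (cur.reverse :: acc) := by
  rw [PySem.Chars.splitlines.go.eq_def]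
  split <;> simp_all

theorem pvGo_keep (c : Char) (rest cur : List Char) (acc : List (List Char))
    (h : pvIsB c = false) :
    PySem.Chars.splitlines.go pvIsB (c :: rest) cur acc =
      PySem.Chars.splitlines.go pvIsB rest (c :: cur) acc := by
  have hc : c ≠ '\r' := by rintro rfl; exact absurd h (by simp [pvIsB])
  rw [PySem.Chars.splitlines.go.eq_def]
  split <;> simp_all

theorem pvGo_nobreak (isB : Char → Bool) (s cur : List Char) (acc : List (List Char))
    (hcur : ∀ c ∈ cur, isB c = false)
    (hacc : ∀ l ∈ acc, ∀ c ∈ l, isB c = false) :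
    ∀ l ∈ PySem.Chars.splitlines.go isB s cur acc, ∀ c ∈ l, isB c = false := by
  fun_induction PySem.Chars.splitlines.go isB s cur acc
  case case1 =>
    intro l hl
    exact hacc l (List.mem_reverse.mp hl)
  case case2 =>
    intro l hl c hc
    rcases List.mem_cons.mp (List.mem_reverse.mp hl) with rfl | hl
    · exact hcur c (List.mem_reverse.mp hc)
    · exact hacc l hl c hc
  case case3 =>
    rename_i ih
    refine ih (by simp) ?_
    intro l hl c hc
    rcases List.mem_cons.mp hl with rfl | hl
    · exact hcur c (List.mem_reverse.mp hc)
    · exact hacc l hl c hc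
  case case4 =>
    rename_i ih
    refine ih (by simp) ?_
    intro l hl c hc
    rcases List.mem_cons.mp hl with rfl | hl
    · exact hcur c (List.mem_reverse.mp hc)
    · exact hacc l hl c hc
  case case5 =>
    rename_i hne ih
    refine ih ?_ hacc
    intro d hd
    rcases List.mem_cons.mp hd with rfl | hd
    · exact eq_false_of_ne_true hne
    · exact hcur d hd

theorem pvSplitlines_nobreak (s : List Char) :
    ∀ l ∈ PySem.Chars.splitlines s, ∀ c ∈ l, pvIsB c = false := by
  rw [pvSplitlines_eq]
  exact pvGo_nobreak _ _ _ _ (by simp) (by simp)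

theorem pvGo_line (line : List Char) (h : ∀ c ∈ line, pvIsB c = false) (s cur : List Char)
    (acc : List (List Char)) :
    PySem.Chars.splitlines.go pvIsB (line ++ s) cur acc =
      PySem.Chars.splitlines.go pvIsB s (line.reverse ++ cur) acc := by
  induction line generalizing cur with
  | nil => simp
  | cons c tl ih =>
    rw [List.cons_append, pvGo_keep _ _ _ _ (h c (by simp)),
      ih (fun d hd => h d (by simp [hd]))]
    simp

theorem pvGo_end (acc : List (List Char)) :
    PySem.Chars.splitlines.go pvIsB "---\n".toList [] acc = acc.reverse ++ ["---".toList] := by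
  rw [show "---\n".toList = "---".toList ++ ['\n'] from rfl,
    pvGo_line _ pvDashes_nobreak, pvGo_break _ _ _ _ rfl (by decide), pvGo_nil]
  simp

theorem pvGo_run (mid : List (List Char)) (h : ∀ l ∈ mid, ∀ c ∈ l, pvIsB c = false)
    (acc : List (List Char)) :
    PySem.Chars.splitlines.go pvIsB
        (PySem.Chars.join ['\n'] mid ++ '\n' :: "---\n".toList) [] acc
      = acc.reverse ++ (if mid = [] then [[]] else mid) ++ ["---".toList] := by
  induction mid generalizing acc with
  | nil =>
    rw [PySem.Chars.join_nil, List.nil_append,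
      pvGo_break _ _ _ _ rfl (by decide), pvGo_end]
    simp
  | cons m ms ih =>
    cases ms with
    | nil =>
      rw [PySem.Chars.join_singleton,
        pvGo_line m (h m (by simp)),
        pvGo_break _ _ _ _ rfl (by decide), pvGo_end]
      simp
    | cons m2 rest =>
      rw [PySem.Chars.join_cons_cons, List.append_assoc, List.append_assoc,
        pvGo_line m (h m (by simp)),
        show ['\n'] ++ (PySem.Chars.join ['\n'] (m2 :: rest) ++ '\n' :: "---\n".toList)
          = '\n' :: (PySem.Chars.join ['\n'] (m2 :: rest) ++ '\n' :: "---\n".toList) from rfl,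
        pvGo_break _ _ _ _ rfl (by decide),
        ih (fun l hl => h l (by simp [hl]))]
      simp

theorem pvSplitlines_recon (mid : List (List Char)) (h : ∀ l ∈ mid, ∀ c ∈ l, pvIsB c = false) :
    PySem.Chars.splitlines ("---\n".toList ++ PySem.Chars.join ['\n'] mid ++ "\n---\n".toList)
      = "---".toList :: ((if mid = [] then [[]] else mid) ++ ["---".toList]) := by
  rw [pvSplitlines_eq,
    show "---\n".toList ++ PySem.Chars.join ['\n'] mid ++ "\n---\n".toList
      = "---".toList ++ ('\n' :: (PySem.Chars.join ['\n'] mid ++ '\n' :: "---\n".toList)) by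
        simp [show "---\n".toList = '-' :: '-' :: '-' :: '\n' :: [] from rfl,
          show "\n---\n".toList = '\n' :: "---\n".toList from rfl,
          show "---".toList = ['-','-','-'] from rfl],
    pvGo_line _ pvDashes_nobreak, pvGo_break _ _ _ _ rfl (by decide), pvGo_run mid h]
  simp

-- string-level fence test and loop body shared by the two characterizations
def pvFence (l : String) : Bool := PySem.Str.strip l == "---"

def pvStep (fm : PySem.Dict String String) (line : String) : PySem.Dict String String :=
  if PySem.Str.isIn ":" line then
    match PySem.Str.splitMax? line ":" 1 with
    | some (key :: value :: _) =>
        fm.insert (PySem.Str.strip key) (PySem.Str.stripChars (PySem.Str.strip value) "\"")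
    | _ => fm
  else fm

theorem pvPfLoop_step (l : String) (tl : List String) (fm : PySem.Dict String String)
    (hf : pvFence l = false) :
    pvPfLoop (l :: tl) fm = pvPfLoop tl (pvStep fm l) := by
  simp only [pvFence] at hf
  rw [pvPfLoop, if_neg (by simp [hf])]
  unfold pvStep
  by_cases hin : PySem.Str.isIn ":" l
  · rw [if_neg (by simpa using hin), if_pos hin]
    cases hsp : PySem.Str.splitMax? l ":" 1 with
    | none => rfl
    | some parts => cases parts with
      | nil => rfl
      | cons k tl2 => cases tl2 with
        | nil => rfl
        | cons v tl3 => rfl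
  · rw [if_pos (by simpa using hin), if_neg hin]

theorem pvAltLoop_step (l : String) (tl : List String) (fm : PySem.Dict String String)
    (hf : pvFence l = false) :
    pvAltLoop (l :: tl) fm = pvAltLoop tl (pvStep fm l) := by
  simp only [pvFence] at hf
  rw [pvAltLoop, if_neg (by simp [hf])]
  unfold pvStep
  by_cases hin : PySem.Str.isIn ":" l
  · rw [if_pos hin, if_pos hin]
    cases hsp : PySem.Str.splitMax? l ":" 1 with
    | none => rfl
    | some parts => cases parts with
      | nil => rfl
      | cons k tl2 => cases tl2 with
        | nil => rfl
        | cons v tl3 => rfl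
  · rw [if_neg hin, if_neg hin]

theorem pvPfLoop_no_fence (lns : List String) (fm : PySem.Dict String String)
    (h : ∀ l ∈ lns, pvFence l = false) :
    pvPfLoop (lns ++ ["---"]) fm = lns.foldl pvStep fm := by
  induction lns generalizing fm with
  | nil =>
    rw [List.nil_append, List.foldl_nil, pvPfLoop, if_pos (by decide)]
  | cons l rest ih =>
    rw [List.cons_append, pvPfLoop_step _ _ _ (h l (by simp)),
      ih _ (fun x hx => h x (by simp [hx])), List.foldl_cons]

theorem pvAltLoop_eq (lns : List String) (fm : PySem.Dict String String) :
    pvAltLoop lns fm = (lns.findIdx? pvFence).map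
      (fun p => ((lns.take p).foldl pvStep fm, lns.drop (p + 1))) := by
  induction lns generalizing fm with
  | nil => simp [pvAltLoop]
  | cons l rest ih =>
    by_cases hf : pvFence l
    · rw [pvAltLoop, if_pos (by simpa [pvFence] using hf),
        List.findIdx?_cons, if_pos hf]
      simp
    · rw [pvAltLoop_step _ _ _ (by simpa using hf), ih,
        List.findIdx?_cons, if_neg (by simpa using hf)]
      cases rest.findIdx? pvFence <;> simp

theorem pvFindEnd_eq (lns : List String) (k : Nat) :
    pvFindEnd lns k = (lns.findIdx? pvFence).map (k + ·) := by
  induction lns generalizing k with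
  | nil => simp [pvFindEnd]
  | cons l rest ih =>
    by_cases hf : pvFence l
    · rw [pvFindEnd, if_pos (by simpa [pvFence] using hf),
        List.findIdx?_cons, if_pos hf]
      simp
    · rw [pvFindEnd, if_neg (by simp [pvFence] at hf; simp [hf]), ih,
        List.findIdx?_cons, if_neg (by simpa using hf)]
      cases rest.findIdx? pvFence with
      | none => simp
      | some p => simp; omega

theorem pvTake_no_fence (lns : List String) (p : Nat) (h : lns.findIdx? pvFence = some p) :
    ∀ l ∈ lns.take p, pvFence l = false := by
  induction lns generalizing p with
  | nil => simp
  | cons x rest ih =>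
    rw [List.findIdx?_cons] at h
    by_cases hf : pvFence x
    · rw [if_pos hf] at h
      injection h with h
      subst h; simp
    · rw [if_neg hf] at h
      cases hp : rest.findIdx? pvFence with
      | none => rw [hp] at h; simp at h
      | some q =>
        rw [hp] at h
        simp only [Option.map_some, Option.some.injEq] at h
        subst h
        intro l hl
        rcases List.mem_cons.mp (by simpa using hl) with rfl | hl2
        · exact eq_false_of_ne_true hf
        · exact ih q hp l hl2


theorem pvParse_recon (mid : List String)
    (h : ∀ l ∈ mid, ∀ c ∈ l.toList, pvIsB c = false)
    (hnf : ∀ l ∈ mid, pvFence l = false) :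
    parse_frontmatter ("---\n" ++ PySem.Str.join "\n" mid ++ "\n---\n")
      = mid.foldl pvStep ∅ := by
  have htl : ("---\n" ++ PySem.Str.join "\n" mid ++ "\n---\n").toList
      = "---\n".toList ++ PySem.Chars.join ['\n'] (mid.map String.toList) ++ "\n---\n".toList := by
    rw [String.toList_append, String.toList_append, PySem.Str.toList_join]; rfl
  have hsp : PySem.Str.splitlines ("---\n" ++ PySem.Str.join "\n" mid ++ "\n---\n")
      = "---" :: ((if mid = [] then [""] else mid) ++ ["---"]) := by
    rw [show PySem.Str.splitlines ("---\n" ++ PySem.Str.join "\n" mid ++ "\n---\n")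
        = (PySem.Chars.splitlines ("---\n" ++ PySem.Str.join "\n" mid ++ "\n---\n").toList).map
            String.ofList from rfl,
      htl, pvSplitlines_recon _ (by simpa using h)]
    by_cases hm : mid = []
    · subst hm; simp
    · rw [if_neg (by simpa using hm), if_neg hm]
      simp [List.map_map, Function.comp_def, String.ofList_toList]
  rw [parse_frontmatter, hsp]
  rw [if_neg (by simp; decide)]
  by_cases hm : mid = []
  · subst hm
    rw [if_pos rfl]
    show pvPfLoop ([""] ++ ["---"]) ∅ = _
    rw [pvPfLoop_no_fence _ _ (by intro l hl; simp at hl; subst hl; decide)]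
    simp [List.foldl]
    show pvStep ∅ "" = ∅
    rw [pvStep, if_neg (by decide)]
  · rw [if_neg hm]
    show pvPfLoop (mid ++ ["---"]) ∅ = _
    exact pvPfLoop_no_fence _ _ hnf


-- ===== VERDICT (by name: the statement is the Claim_ definition above) =====
theorem split_frontmatter_spec : Claim_equal_split_frontmatter := by
  unfold Claim_equal_split_frontmatter
  intro text _
  unfold Spec_split_frontmatter
  simp only [split_frontmatter, split_frontmatter_alt]
  cases hls : PySem.Str.splitlines text with
  | nil => simp
  | cons first rest =>
    by_cases hf : pvFence first
    · have hf' : (PySem.Str.strip first == "---") = true := hf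
      simp only [List.isEmpty_cons, List.headD_cons, List.tail_cons, hf', Bool.not_true, Bool.or_false]
      rw [if_neg (by simp), if_neg (by simp)]
      rw [pvFindEnd_eq, pvAltLoop_eq]
      cases hidx : rest.findIdx? pvFence with
      | none => simp
      | some p =>
        simp only [Option.map_some]
        have hnb : ∀ l ∈ rest.take p, ∀ c ∈ l.toList, pvIsB c = false := by
          intro l hl
          apply pvSplitlines_nobreak text.toList l.toList
          rw [← PySem.Str.splitlines_map_toList, hls]
          exact List.mem_map_of_mem
            (List.mem_cons_of_mem _ (List.mem_of_mem_take hl))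
        have hsl2 : PySem.List.slice (first :: rest) (some (((1 + p : Nat) : Int) + 1)) none
            = rest.drop (p + 1) := by
          rw [show (((1 + p : Nat) : Int) + 1) = ((p + 2 : Nat) : Int) by push_cast; ring,
            PySem.List.slice_from _ (by positivity)]
          simp only [Int.toNat_natCast]
          rw [show p + 2 = (p + 1) + 1 by ring, List.drop_succ_cons]
        have hsl1' : PySem.List.slice (first :: rest) (some 1) (some ((1 + p : Nat) : Int))
            = rest.take p := by
          have h0 := PySem.List.slice_natCast (first :: rest) 1 (1 + p)
          simp only [Nat.cast_one] at h0
          rw [h0]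
          simp
        rw [hsl1', hsl2, pvParse_recon _ hnb (pvTake_no_fence _ _ hidx)]
    · have hf'' : (PySem.Str.strip first == "---") = false := by
        simpa [pvFence] using hf
      simp [hf'']
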